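-- pv_equiv track=rewrite | github.com/perlowja/calliope | src/calliope/assets/asset.py | _insert_hash
-- ===== SOURCE A (Python) =====
-- def _insert_hash(logical_path: str, content_hash: str) -> str:
--     """`main.css` + `a1b2c3d4` → `main.a1b2c3d4.css`."""
--     if "/" in logical_path:
--         directory, _, filename = logical_path.rpartition("/")
--         return f"{directory}/{_insert_hash(filename, content_hash)}"
--     if "." in logical_path:
--         stem, _, suffix = logical_path.rpartition(".")
--         return f"{stem}.{content_hash}.{suffix}"
--     return f"{logical_path}.{content_hash}"
-- ===== SOURCE B (Python) =====
-- def _insert_hash(logical_path: str, content_hash: str) -> str: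
--     directory, sep, filename = logical_path.rpartition("/")
--     if "." in filename:
--         stem, _, suffix = filename.rpartition(".")
--         new_name = f"{stem}.{content_hash}.{suffix}"
--     else:
--         new_name = f"{filename}.{content_hash}"
--     return f"{directory}/{new_name}" if sep else new_name
-- ===== Notes on version B (the rewrite author's own statement) =====
-- stated objective: simpler
-- what changed: Replaces A's recursive self-call for the directory case with a single rpartition of the path and a non-recursive assembly of the new filename.
import Mathlib
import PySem

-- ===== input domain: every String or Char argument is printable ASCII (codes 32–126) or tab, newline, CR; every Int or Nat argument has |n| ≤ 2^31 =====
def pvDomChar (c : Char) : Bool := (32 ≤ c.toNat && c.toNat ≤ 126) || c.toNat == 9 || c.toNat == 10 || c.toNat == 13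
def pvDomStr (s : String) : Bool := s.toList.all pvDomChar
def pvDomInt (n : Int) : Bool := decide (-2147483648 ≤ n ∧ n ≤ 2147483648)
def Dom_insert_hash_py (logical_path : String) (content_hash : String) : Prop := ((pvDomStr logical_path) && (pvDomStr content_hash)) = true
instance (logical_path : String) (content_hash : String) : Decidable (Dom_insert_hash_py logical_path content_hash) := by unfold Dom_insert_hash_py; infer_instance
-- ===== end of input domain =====

-- B replaces A's recursive self-call for the directory case with one rpartition of the
-- path and a non-recursive assembly of the new filename (same cost, simpler shape).

-- ===== PORT A =====
-- s.rpartition(c) for a ONE-CHARACTER separator, on List Char: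
-- some (before, after) when c occurs (split at the LAST occurrence), none when it does not
-- ('c in s' is exactly 'pvRPart c s ≠ none', so the membership test and the rpartition
-- of the Python are one match here — exact for a single-character separator).
def pvRPart (c : Char) : List Char → Option (List Char × List Char)
  | [] => none
  | x :: xs =>
    match pvRPart c xs with
    | some (a, b) => some (x :: a, b)
    | none => if x = c then some ([], xs) else none

theorem pvRPart_len {c : Char} : ∀ {s a b : List Char},
    pvRPart c s = some (a, b) → b.length < s.length := by
  intro s
  induction s with
  | nil => intro a b h; simp [pvRPart] at h
  | cons x xs ih =>
    intro a b h
    simp only [pvRPart] at h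
    cases hx : pvRPart c xs with
    | some p =>
      rw [hx] at h
      cases p with
      | mk a' b' =>
        simp at h
        obtain ⟨_, hb⟩ := h
        subst hb
        exact Nat.lt_succ_of_lt (ih hx)
    | none =>
      rw [hx] at h
      simp at h
      obtain ⟨_, _, hb⟩ := h
      subst hb
      simp

-- literal transliteration of A: recursive on the part after the last '/'
def insertHashA (lp hash : List Char) : List Char :=
  match h : pvRPart '/' lp with
  | some (dir, fn) => dir ++ '/' :: insertHashA fn hash
  | none =>
    match pvRPart '.' lp with
    | some (stem, suf) => stem ++ '.' :: (hash ++ '.' :: suf)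
    | none => lp ++ '.' :: hash
termination_by lp.length
decreasing_by exact pvRPart_len h

def insert_hash_py (logical_path : String) (content_hash : String) : String :=
  String.ofList (insertHashA logical_path.toList content_hash.toList)

-- ===== PORT B =====
-- literal transliteration of B: one rpartition on '/', build new_name from the filename,
-- prefix the directory only when a '/' was present
def insertHashB (lp hash : List Char) : List Char :=
  let (pref, fn) :=
    match pvRPart '/' lp with
    | some (dir, fn) => (dir ++ ['/'], fn)
    | none => (([] : List Char), lp)
  let newName :=
    match pvRPart '.' fn with
    | some (stem, suf) => stem ++ '.' :: (hash ++ '.' :: suf)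
    | none => fn ++ '.' :: hash
  pref ++ newName

def insert_hash_py_alt (logical_path : String) (content_hash : String) : String :=
  String.ofList (insertHashB logical_path.toList content_hash.toList)

-- ===== PRECONDITION & SPEC =====
def Spec_insert_hash_py (logical_path : String) (content_hash : String) (out : String) : Prop := out = insert_hash_py_alt logical_path content_hash
instance (logical_path : String) (content_hash : String) (out : String) : Decidable (Spec_insert_hash_py logical_path content_hash out) := by unfold Spec_insert_hash_py; infer_instance

-- ===== CLAIM (what is proved, stated in full; the proofs are below) =====
def Claim_equal_insert_hash_py : Prop := ∀ (logical_path : String) (content_hash : String), Dom_insert_hash_py logical_path content_hash → Spec_insert_hash_py logical_path content_hash (insert_hash_py logical_path content_hash)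

-- ===== LEMMAS AND PROOFS =====

-- the part after the last occurrence contains the separator no more
theorem pvRPart_not_mem {c : Char} : ∀ {s a b : List Char},
    pvRPart c s = some (a, b) → pvRPart c b = none := by
  intro s
  induction s with
  | nil => intro a b h; simp [pvRPart] at h
  | cons x xs ih =>
    intro a b h
    simp only [pvRPart] at h
    cases hx : pvRPart c xs with
    | some p =>
      rw [hx] at h
      cases p with
      | mk a' b' =>
        simp at h
        obtain ⟨_, hb⟩ := h
        subst hb
        exact ih hx
    | none =>
      rw [hx] at h
      simp at h
      obtain ⟨_, _, hb⟩ := h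
      subst hb
      exact hx

theorem insertHashA_eq_B (lp hash : List Char) : insertHashA lp hash = insertHashB lp hash := by
  rw [insertHashA]
  cases h : pvRPart '/' lp with
  | none => simp [insertHashB, h]
  | some p =>
    cases p with
    | mk dir fn =>
      simp only [h]
      rw [insertHashA]
      rw [pvRPart_not_mem h]
      simp [insertHashB, h]

theorem insert_hash_py_spec : Claim_equal_insert_hash_py := by
  intro lp hash _
  show insert_hash_py lp hash = insert_hash_py_alt lp hash
  unfold insert_hash_py insert_hash_py_alt
  rw [insertHashA_eq_B]
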